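-- pv_equiv track=rewrite | github.com/yewon129/TIL | 2_Python/1월_3주차/Thur_practice/2-1_불쌍한_달팽이.py | snail
-- ===== SOURCE A (Python) =====
-- def snail(height,day,night):
--     length = 0
--     count = 0
--     while length < height :
--         length += day
--         count += 1
--         if length < height:
--             length -= night
--
--     return count
-- ===== SOURCE B (Python) =====
-- def snail(height, day, night):
--     # Closed form: ceiling formula instead of simulating each day.
--     if height <= 0:
--         return 0
--     if day >= height:
--         return 1
--     return 1 + -((day - height) // (day - night))
-- ===== Notes on version B (the rewrite author's own statement) =====
-- stated objective: simpler
-- what changed: Replaces the day-by-day simulation loop with a closed-form ceiling formula 1 + ceil((height-day)/(day-night)).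
-- outside the precondition, e.g. on snail(10, 1, -20): A returns 1, B returns 2
import Mathlib
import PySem

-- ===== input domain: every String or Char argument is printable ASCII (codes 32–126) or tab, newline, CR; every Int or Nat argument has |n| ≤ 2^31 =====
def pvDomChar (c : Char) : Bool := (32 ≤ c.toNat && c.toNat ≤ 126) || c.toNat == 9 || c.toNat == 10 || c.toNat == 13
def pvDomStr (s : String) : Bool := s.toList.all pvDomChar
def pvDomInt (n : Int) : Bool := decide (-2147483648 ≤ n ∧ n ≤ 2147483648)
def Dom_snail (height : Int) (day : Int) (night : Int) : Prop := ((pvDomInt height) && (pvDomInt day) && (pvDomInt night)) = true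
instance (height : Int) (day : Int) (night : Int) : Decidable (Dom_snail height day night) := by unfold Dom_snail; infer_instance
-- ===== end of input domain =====

-- B replaces A's day-by-day simulation loop with a closed-form ceiling formula (simpler).


-- ===== PORT A =====
-- fuel-bounded transliteration of A's while loop (fuel only makes it total;
-- under Pre_snail the fuel is never exhausted)
def snailLoop (height : Int) (day : Int) (night : Int) : Nat → Int → Int → Int
  | 0, _, count => count
  | fuel+1, length, count =>
    if length < height then
      let length' := length + day
      if length' < height then snailLoop height day night fuel (length' - night) (count + 1)
      else count + 1
    else count

def snail (height : Int) (day : Int) (night : Int) : Int :=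
  snailLoop height day night ((height - day).toNat + 2) 0 0

-- ===== PORT B =====
def snail_alt (height : Int) (day : Int) (night : Int) : Int :=
  if height ≤ 0 then 0
  else if day ≥ height then 1
  else 1 + -(PySem.Int.floordiv (day - height) (day - night))

-- ===== PRECONDITION & SPEC =====
-- Pre_ keeps the natural domain: A loops forever when height > day and the net daily
-- progress day - night is ≤ 0; additionally Pre_ excludes negative night (the snail
-- sliding UPWARD overnight, outside the puzzle's natural domain), where A's loop can
-- also terminate via the post-slide while-check and the ceiling formula overcounts.
def Pre_snail (height : Int) (day : Int) (night : Int) : Prop :=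
  height ≤ 0 ∨ height ≤ day ∨ (0 ≤ night ∧ 1 ≤ day - night)
instance (height : Int) (day : Int) (night : Int) : Decidable (Pre_snail height day night) := by
  unfold Pre_snail; infer_instance

def pvWitness_snail : Int × Int × Int := (10, 3, 1)

def Spec_snail (height : Int) (day : Int) (night : Int) (out : Int) : Prop := out = snail_alt height day night
instance (height : Int) (day : Int) (night : Int) (out : Int) : Decidable (Spec_snail height day night out) := by unfold Spec_snail; infer_instance

-- ===== CLAIM (what is proved, stated in full; the proofs are below) =====
def Claim_equal_snail : Prop := ∀ (height : Int) (day : Int) (night : Int), Dom_snail height day night → Pre_snail height day night → Spec_snail height day night (snail height day night)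

-- ===== LEMMAS AND PROOFS =====

-- floor-division facts (0 < b throughout)
lemma fd_lt_zero (a b : Int) (hb : 0 < b) (ha : a < 0) : PySem.Int.floordiv a b < 0 := by
  rw [PySem.Int.floordiv_lt_iff_lt_mul hb]; simpa using ha

lemma fd_nonneg (a b : Int) (hb : 0 < b) (ha : 0 ≤ a) : 0 ≤ PySem.Int.floordiv a b := by
  rw [PySem.Int.le_floordiv_iff_mul_le hb]; simpa using ha

lemma fd_shift (a b : Int) (hb : 0 < b) :
    PySem.Int.floordiv (a + b) b = PySem.Int.floordiv a b + 1 := by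
  have h := (PySem.Int.floordiv_eq_iff_of_pos (a := a) (b := b) hb).mp rfl
  rw [PySem.Int.floordiv_eq_iff_of_pos hb]
  constructor <;> nlinarith [h.1, h.2]

-- one-step unfolding of the loop (rfl), used to unroll exactly one iteration
lemma snailLoop_succ (height day night : Int) (fuel : Nat) (length count : Int) :
    snailLoop height day night (fuel + 1) length count =
      if length < height then
        (if length + day < height then
          snailLoop height day night fuel (length + day - night) (count + 1)
        else count + 1)
      else count := rfl

-- loop invariant: with 0 ≤ night, 1 ≤ day - night, enough fuel and length < height,
-- the loop returns count + 1 + max 0 (ceil((height - length - day)/(day - night)))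
lemma loop_eq (height day night : Int) (hn : 0 ≤ night) (hD : 1 ≤ day - night) :
    ∀ (fuel : Nat) (length count : Int), length < height →
      height - (length + day) ≤ (day - night) * (fuel : Int) →
      snailLoop height day night (fuel + 1) length count =
        count + 1 + max 0 (-(PySem.Int.floordiv (length + day - height) (day - night))) := by
  intro fuel
  induction fuel with
  | zero =>
    intro length count hlt hb
    simp only [Nat.cast_zero, mul_zero] at hb
    have hge : ¬ (length + day < height) := by omega
    have h0 : 0 ≤ PySem.Int.floordiv (length + day - height) (day - night) :=
      fd_nonneg _ _ (by omega) (by omega)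
    rw [snailLoop_succ, if_pos hlt, if_neg hge]
    omega
  | succ fuel ih =>
    intro length count hlt hb
    by_cases hge : length + day < height
    · have hrec : length + day - night < height := by omega
      have hb' : height - ((length + day - night) + day) ≤ (day - night) * (fuel : Int) := by
        push_cast at hb ⊢; nlinarith
      have hih := ih (length + day - night) (count + 1) hrec hb'
      rw [snailLoop_succ, if_pos hlt, if_pos hge, hih]
      -- ceiling shift: for x < 0, max 0 (-(fd x D)) = 1 + max 0 (-(fd (x+D) D))
      have hsh : PySem.Int.floordiv (length + day - night + day - height) (day - night)
          = PySem.Int.floordiv (length + day - height) (day - night) + 1 := by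
        have := fd_shift (length + day - height) (day - night) (by omega)
        rw [← this]; ring_nf
      have hneg : PySem.Int.floordiv (length + day - height) (day - night) < 0 :=
        fd_lt_zero _ _ (by omega) (by omega)
      rw [hsh]
      omega
    · have h0 : 0 ≤ PySem.Int.floordiv (length + day - height) (day - night) :=
        fd_nonneg _ _ (by omega) (by omega)
      rw [snailLoop_succ, if_pos hlt, if_neg hge]
      omega

-- ===== VERDICT (by name: the statement is the Claim_ definition above) =====
theorem snail_spec : Claim_equal_snail := by
  intro height day night _hdom hpre
  unfold Spec_snail snail snail_alt
  have e : snailLoop height day night ((height - day).toNat + 2) 0 0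
      = snailLoop height day night (((height - day).toNat + 1) + 1) 0 0 := rfl
  rw [e]
  by_cases h0 : height ≤ 0
  · -- loop body never runs
    have hnl : ¬ ((0:Int) < height) := by omega
    rw [snailLoop_succ, if_neg hnl, if_pos h0]
  · by_cases h1 : day ≥ height
    · -- first day already clears the well
      have hlt : (0 : Int) < height := by omega
      have hno : ¬ ((0:Int) + day < height) := by omega
      rw [snailLoop_succ, if_pos hlt, if_neg hno, if_neg h0, if_pos h1]
      omega
    · rcases hpre with h | h | ⟨hn, hD⟩
      · omega
      · omega
      · have hb : height - (0 + day) ≤ (day - night) * (((height - day).toNat + 1 : Nat) : Int) := by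
          have h2 : height - day ≤ (((height - day).toNat : Nat) : Int) := Int.self_le_toNat _
          push_cast at h2 ⊢
          nlinarith
        rw [loop_eq height day night hn hD ((height - day).toNat + 1) 0 0 (by omega) hb]
        have hneg : PySem.Int.floordiv (0 + day - height) (day - night) < 0 :=
          fd_lt_zero _ _ (by omega) (by omega)
        rw [show (0:Int) + day - height = day - height by ring] at hneg ⊢
        rw [if_neg h0, if_neg h1]
        omega
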